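-- pv_equiv track=rewrite | github.com/SurepallyBhavani/pg_project_rag | rag-project-2026-04-09/src/graph_database/graph_query_processor.py | _format_hierarchy_response
-- ===== SOURCE A (Python) =====
-- from typing import Dict, List, Any, Tuple
--
-- def _format_hierarchy_response(results: List[Dict]) -> str:
--     """Format hierarchy query results"""
--     response = "**Hierarchical Structure:**\n\n"
--
--     for result in results:
--         if 'hierarchy_nodes' in result:
--             nodes = result['hierarchy_nodes']
--             if len(nodes) > 1:
--                 hierarchy_path = " → ".join([node.get('name', 'Unknown') for node in nodes])
--                 response += f"• {hierarchy_path}\n"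
--
--     if response == "**Hierarchical Structure:**\n\n":
--         response = "No clear hierarchical relationships found in the graph database."
--
--     return response
-- ===== SOURCE B (Python) =====
-- def _format_hierarchy_response(results):
--     """Format hierarchy query results"""
--     def body(rs):
--         # build the bullet lines back-to-front by structural recursion
--         if not rs:
--             return ""
--         rest = body(rs[1:])
--         nodes = rs[0].get('hierarchy_nodes', [])
--         if len(nodes) > 1:
--             path = nodes[0].get('name', 'Unknown')
--             for node in nodes[1:]:
--                 path = path + " → " + node.get('name', 'Unknown')
--             return "• " + path + "\n" + rest
--         return rest
--
--     b = body(results)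
--     if not b:
--         return "No clear hierarchical relationships found in the graph database."
--     return "**Hierarchical Structure:**\n\n" + b
-- ===== Notes on version B (the rewrite author's own statement) =====
-- stated objective: alternative
-- what changed: Replaces A's single forward loop that accumulates one big string and compares it against the header sentinel with a recursive back-to-front construction of the body (each arrow path built by manual left-fold concatenation instead of str.join) and a branch on body emptiness.
import Mathlib
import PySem

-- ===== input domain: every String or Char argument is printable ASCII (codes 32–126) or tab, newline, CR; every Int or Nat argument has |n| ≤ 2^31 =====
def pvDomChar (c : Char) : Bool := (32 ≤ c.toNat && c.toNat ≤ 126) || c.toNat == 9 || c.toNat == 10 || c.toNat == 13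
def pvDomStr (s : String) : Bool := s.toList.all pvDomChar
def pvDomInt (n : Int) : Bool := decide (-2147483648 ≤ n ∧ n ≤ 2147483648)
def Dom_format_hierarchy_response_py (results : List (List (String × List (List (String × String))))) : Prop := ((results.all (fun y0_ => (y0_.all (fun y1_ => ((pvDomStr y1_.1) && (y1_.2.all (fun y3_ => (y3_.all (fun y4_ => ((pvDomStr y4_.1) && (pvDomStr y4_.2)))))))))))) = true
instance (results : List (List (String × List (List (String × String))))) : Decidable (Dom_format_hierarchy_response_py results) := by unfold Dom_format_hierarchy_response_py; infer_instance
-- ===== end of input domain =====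

-- B replaces A's forward accumulate-then-sentinel-compare with a recursive back-to-front body build
-- (arrow paths by manual fold instead of join) branching on body emptiness (alternative decomposition; same cost).


-- ===== PORT A =====
-- node.get('name', 'Unknown') — first-match dict lookup with default (used by both Pythons verbatim)
def pvName (node : List (String × String)) : String :=
  (List.lookup "name" node).getD "Unknown"

def format_hierarchy_response_py (results : List (List (String × List (List (String × String))))) : String :=
  -- `'hierarchy_nodes' in result` followed by `result['hierarchy_nodes']` ported as one
  -- first-match lookup (Python-dict semantics); exact.
  let response := results.foldl (fun response result =>
    match List.lookup "hierarchy_nodes" result with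
    | some nodes =>
        if nodes.length > 1 then
          response ++ ("• " ++ PySem.Str.join " → " (nodes.map pvName)) ++ "\n"
        else response
    | none => response) "**Hierarchical Structure:**\n\n"
  if response = "**Hierarchical Structure:**\n\n" then
    "No clear hierarchical relationships found in the graph database."
  else response

-- ===== PORT B =====
-- B's inner `body`: structural recursion building the bullet lines back-to-front;
-- each arrow path is built by a manual fold over nodes[1:] starting from nodes[0].
def pvBodyB : List (List (String × List (List (String × String)))) → String
  | [] => ""
  | r :: rs =>
      let rest := pvBodyB rs
      let nodes := (List.lookup "hierarchy_nodes" r).getD []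
      if nodes.length > 1 then
        match nodes with
        | n0 :: ntl =>
            "• " ++ ntl.foldl (fun p node => p ++ " → " ++ pvName node) (pvName n0) ++ "\n" ++ rest
        | [] => rest  -- unreachable: length > 1
      else rest

def format_hierarchy_response_py_alt (results : List (List (String × List (List (String × String))))) : String :=
  let b := pvBodyB results
  if b = "" then
    "No clear hierarchical relationships found in the graph database."
  else
    "**Hierarchical Structure:**\n\n" ++ b

-- ===== PRECONDITION & SPEC =====
def Spec_format_hierarchy_response_py (results : List (List (String × List (List (String × String))))) (out : String) : Prop := out = format_hierarchy_response_py_alt results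
instance (results : List (List (String × List (List (String × String))))) (out : String) : Decidable (Spec_format_hierarchy_response_py results out) := by unfold Spec_format_hierarchy_response_py; infer_instance

-- ===== CLAIM =====
def Claim_equal_format_hierarchy_response_py : Prop := ∀ (results : List (List (String × List (List (String × String))))), Dom_format_hierarchy_response_py results → Spec_format_hierarchy_response_py results (format_hierarchy_response_py results)

-- ===== LEMMAS AND PROOFS =====

-- ' → '.join over a nonempty list equals B's manual left-fold concatenation
theorem pvJoin_eq_fold (ntl : List String) (x : String) :
    PySem.Str.join " → " (x :: ntl) = ntl.foldl (fun p y => p ++ " → " ++ y) x := by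
  induction ntl generalizing x with
  | nil =>
      apply String.toList_inj.mp
      simp [PySem.Chars.join_singleton]
  | cons y ys ih =>
      rw [List.foldl_cons, ← ih (x ++ " → " ++ y)]
      apply String.toList_inj.mp
      simp only [PySem.Str.join, String.toList_append]
      cases ys with
      | nil => simp [PySem.Chars.join_singleton, PySem.Chars.join_cons_cons]
      | cons z zs => simp [PySem.Chars.join_cons_cons]

-- A's loop from any seed appends exactly B's body
theorem pvFoldA (results : List (List (String × List (List (String × String))))) (s : String) :
    results.foldl (fun response result =>
      match List.lookup "hierarchy_nodes" result with
      | some nodes =>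
          if nodes.length > 1 then
            response ++ ("• " ++ PySem.Str.join " → " (nodes.map pvName)) ++ "\n"
          else response
      | none => response) s = s ++ pvBodyB results := by
  induction results generalizing s with
  | nil => simp [pvBodyB]
  | cons r rs ih =>
      simp only [List.foldl_cons]
      cases h : List.lookup "hierarchy_nodes" r with
      | none => rw [ih]; simp [pvBodyB, h]
      | some nodes =>
          by_cases hl : nodes.length > 1
          · cases nodes with
            | nil => simp at hl
            | cons n0 ntl =>
                rw [ih]
                simp only [pvBodyB, h, Option.getD_some, hl, if_pos]
                rw [List.map_cons, pvJoin_eq_fold, ← List.foldl_map (f := pvName)]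
                simp only [String.append_assoc]
                have hfun : (fun (p y : String) => p ++ (" → " ++ y)) =
                    (fun (p y : String) => p ++ " → " ++ y) := by
                  funext p y; rw [String.append_assoc]
                rw [hfun]
          · rw [ih]; simp [pvBodyB, h, hl]

-- ===== VERDICT =====
theorem format_hierarchy_response_py_spec : Claim_equal_format_hierarchy_response_py := by
  intro results _
  unfold Spec_format_hierarchy_response_py format_hierarchy_response_py format_hierarchy_response_py_alt
  simp only [pvFoldA]
  by_cases h : pvBodyB results = ""
  · simp [h]
  · simp [h, String.append_eq_left_iff]
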